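-- pv_equiv track=rewrite | github.com/ServiceNow/bytesteady | gene_classification/data/data_utils.py | sequence_contains_invalid
-- ===== SOURCE A (Python) =====
-- NON_STANDARD_MARKER = "*"
--
-- NON_STANDARD_NUCLEOTIDES = [
--     "k",
--     "m",
--     "r",
--     "y",
--     "s",
--     "w",
--     "b",
--     "v",
--     "h",
--     "d",
--     "x",
--     "n",
--     ".",
--     "-",
-- ]
--
-- def sequence_contains_invalid(sequence):
--     """
--     Checks if a sequence contains invalid nucleotides
--
--     """
--     valid = dict(zip(NON_STANDARD_NUCLEOTIDES, [True] * len(NON_STANDARD_NUCLEOTIDES)))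
--     valid.update(
--         {"a": True, "c": True, "g": True, "t": True, NON_STANDARD_MARKER: True}
--     )
--     for x in sequence.lower():
--         if x not in valid:
--             return True
--     return False
-- ===== SOURCE B (Python) =====
-- NON_STANDARD_MARKER = "*"
--
-- NON_STANDARD_NUCLEOTIDES = [
--     "k", "m", "r", "y", "s", "w", "b", "v", "h", "d", "x", "n", ".", "-",
-- ]
--
-- VALID_CHARS = "acgt" + NON_STANDARD_MARKER + "".join(NON_STANDARD_NUCLEOTIDES)
--
--
-- def sequence_contains_invalid(sequence):
--     # Count, per valid alphabet letter, how often it occurs in the lowered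
--     # sequence; the sequence is all-valid exactly when these counts add up
--     # to its length (the valid letters are pairwise distinct).
--     s = sequence.lower()
--     return sum(s.count(c) for c in VALID_CHARS) != len(s)
-- ===== Notes on version B (the rewrite author's own statement) =====
-- stated objective: alternative
-- what changed: Instead of A's per-character early-exit membership scan, B iterates over the fixed 19-letter valid alphabet, counts each letter's occurrences in the lowered sequence with str.count, and reports invalid iff the counts do not sum to the sequence length.
import Mathlib
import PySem

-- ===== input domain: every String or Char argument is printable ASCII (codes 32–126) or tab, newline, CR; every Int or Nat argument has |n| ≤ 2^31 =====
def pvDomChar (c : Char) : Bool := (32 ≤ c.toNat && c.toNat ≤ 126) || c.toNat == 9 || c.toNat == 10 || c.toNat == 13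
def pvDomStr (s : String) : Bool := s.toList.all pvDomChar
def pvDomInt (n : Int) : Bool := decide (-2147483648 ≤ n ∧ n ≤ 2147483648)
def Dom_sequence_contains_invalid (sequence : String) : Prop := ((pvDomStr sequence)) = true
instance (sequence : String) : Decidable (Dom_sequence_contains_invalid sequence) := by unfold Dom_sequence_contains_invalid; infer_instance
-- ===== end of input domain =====

-- B replaces A's per-character early-exit membership scan by counting, per letter of the fixed
-- valid alphabet, its occurrences in the lowered sequence and comparing the total to the length.

-- ===== PORT A =====
-- NON_STANDARD_NUCLEOTIDES (Python 1-char strings, keyed/iterated as characters)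
def pvNonStandardA : List Char := ['k','m','r','y','s','w','b','v','h','d','x','n','.','-']

-- for x in sequence.lower(): if x not in valid: return True / (after the loop) return False
def pvLoopA (valid : PySem.Dict Char Bool) : List Char → Bool
  | [] => false
  | c :: rest => if !(valid.contains c) then true else pvLoopA valid rest

-- valid = dict(zip(NON_STANDARD_NUCLEOTIDES, [True]*len(...))); valid.update({a,c,g,t,*})
def pvValidDict : PySem.Dict Char Bool :=
  let valid : PySem.Dict Char Bool :=
    (pvNonStandardA.zip (List.replicate pvNonStandardA.length true)).foldl
      (fun d kv => d.insert kv.1 kv.2) (PySem.Dict.mk [])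
  ((((valid.insert 'a' true).insert 'c' true).insert 'g' true).insert 't' true).insert '*' true

def sequence_contains_invalid (sequence : String) : Bool :=
  pvLoopA pvValidDict (PySem.Str.lower sequence).toList

-- ===== PORT B =====
-- VALID_CHARS = "acgt" + NON_STANDARD_MARKER + "".join(NON_STANDARD_NUCLEOTIDES)
def pvVALID_CHARS : List Char :=
  ['a','c','g','t','*','k','m','r','y','s','w','b','v','h','d','x','n','.','-']

-- return sum(s.count(c) for c in VALID_CHARS) != len(s)
def sequence_contains_invalid_alt (sequence : String) : Bool :=
  let s := PySem.Str.lower sequence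
  decide ((pvVALID_CHARS.map (fun c => PySem.Str.count s (String.ofList [c]))).sum ≠ PySem.Str.len s)

-- ===== PRECONDITION & SPEC =====
def Spec_sequence_contains_invalid (sequence : String) (out : Bool) : Prop := out = sequence_contains_invalid_alt sequence
instance (sequence : String) (out : Bool) : Decidable (Spec_sequence_contains_invalid sequence out) := by unfold Spec_sequence_contains_invalid; infer_instance

-- ===== CLAIM (what is proved, stated in full; the proofs are below) =====
def Claim_equal_sequence_contains_invalid : Prop := ∀ (sequence : String), Dom_sequence_contains_invalid sequence → Spec_sequence_contains_invalid sequence (sequence_contains_invalid sequence)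

-- ===== LEMMAS AND PROOFS =====

-- Python's s.count(c) for a single character c is the character count
theorem pvCountGo_singleton (c : Char) (l : List Char) (fuel acc : ℕ) (h : l.length ≤ fuel) :
    PySem.Chars.count.go [c] fuel l acc = acc + l.count c := by
  induction l generalizing fuel acc with
  | nil => cases fuel <;> simp [PySem.Chars.count.go]
  | cons x t ih =>
    cases fuel with
    | zero => simp at h
    | succ n =>
      simp only [PySem.Chars.count.go]
      by_cases hx : c = x
      · subst hx
        simp [List.isPrefixOf, ih n (acc + 1) (by simpa using h)]
        omega
      · have : List.isPrefixOf [c] (x :: t) = false := by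
          simp [List.isPrefixOf]; exact fun hcx => hx hcx
        simp only [this, Bool.false_eq_true, if_false]
        rw [ih n acc (by simpa using h)]
        simp [Ne.symm hx]

theorem pvCount_singleton (c : Char) (l : List Char) :
    PySem.Chars.count l [c] = l.count c := by
  simp [PySem.Chars.count]
  simpa using pvCountGo_singleton c l l.length 0 le_rfl

-- summing per-letter counts over a duplicate-free alphabet counts the valid characters
theorem pvSum_indicator (x : Char) (V : List Char) :
    (V.map (fun c => if (x == c) = true then (1 : ℕ) else 0)).sum = List.count x V := by
  induction V with
  | nil => simp
  | cons c V ih =>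
    simp only [List.map_cons, List.sum_cons, List.count_cons, ih]
    by_cases h : x = c
    · simp [h]; omega
    · simp [h, Ne.symm h]

theorem pvSum_counts (l : List Char) :
    (pvVALID_CHARS.map (fun c => l.count c)).sum = l.countP (fun x => pvVALID_CHARS.contains x) := by
  induction l with
  | nil => simp [pvVALID_CHARS]
  | cons x t ih =>
    have hsum : (pvVALID_CHARS.map (fun c => (x :: t).count c)).sum
        = (pvVALID_CHARS.map (fun c => t.count c)).sum + pvVALID_CHARS.count x := by
      simp only [List.count_cons]
      rw [List.sum_map_add, pvSum_indicator x pvVALID_CHARS]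
    have hmem : pvVALID_CHARS.count x = (if pvVALID_CHARS.contains x then 1 else 0) := by
      by_cases hx : x ∈ pvVALID_CHARS
      · rw [List.count_eq_one_of_mem (by decide) hx]; simp [hx]
      · rw [List.count_eq_zero_of_not_mem hx]; simp [hx]
    rw [hsum, hmem, List.countP_cons, ih]

-- A's dict accepts exactly the characters of B's alphabet
theorem pvContains_agree (c : Char) :
    pvValidDict.contains c = pvVALID_CHARS.contains c := by
  rw [PySem.Dict.contains_eq_decide_mem_keys]
  have hk : pvValidDict.keys = ['k','m','r','y','s','w','b','v','h','d','x','n','.','-',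
      'a','c','g','t','*'] := by decide
  rw [hk]
  refine Bool.eq_iff_iff.mpr ?_
  simp [pvVALID_CHARS]
  tauto

-- the early-exit loop returns "some character missing from the dict"
theorem pvLoopA_eq_all (xs : List Char) :
    pvLoopA pvValidDict xs = !(xs.all (fun c => pvValidDict.contains c)) := by
  induction xs with
  | nil => simp [pvLoopA]
  | cons c rest ih =>
    simp only [pvLoopA, List.all_cons]
    by_cases h : pvValidDict.contains c = true <;> simp [h, ih]

-- ===== VERDICT (by name: the statement is the Claim_ definition above) =====
theorem sequence_contains_invalid_spec : Claim_equal_sequence_contains_invalid := by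
  intro sequence _
  unfold Spec_sequence_contains_invalid sequence_contains_invalid sequence_contains_invalid_alt
  rw [pvLoopA_eq_all]
  set l := (PySem.Str.lower sequence).toList with hl
  have hcnt : (pvVALID_CHARS.map (fun c => PySem.Str.count (PySem.Str.lower sequence) (String.ofList [c]))).sum
      = l.countP (fun x => pvVALID_CHARS.contains x) := by
    rw [← pvSum_counts]
    refine congrArg List.sum (List.map_congr_left fun c _ => ?_)
    rw [PySem.Str.count_eq]
    simp [hl, pvCount_singleton]
  have hlen : PySem.Str.len (PySem.Str.lower sequence) = l.length := by
    simp [PySem.Str.len_eq, hl]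
  have key : (l.countP (fun x => pvVALID_CHARS.contains x) = l.length)
      ↔ (∀ c ∈ l, pvValidDict.contains c = true) := by
    rw [List.countP_eq_length]
    constructor
    · intro h c hc; rw [pvContains_agree]; exact h c hc
    · intro h c hc; rw [← pvContains_agree]; exact h c hc
  simp only [hcnt, hlen]
  by_cases hall : ∀ c ∈ l, pvValidDict.contains c = true
  · have hcp := key.mpr hall
    have hb : l.all (fun c => pvValidDict.contains c) = true := List.all_eq_true.mpr hall
    rw [hb, hcp]
    simp
  · have hcp : l.countP (fun x => pvVALID_CHARS.contains x) ≠ l.length := fun h => hall (key.mp h)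
    have hb : l.all (fun c => pvValidDict.contains c) = false := by
      simpa [List.all_eq_true] using hall
    simp only [hb, Bool.not_false]
    symm
    simp only [decide_eq_true_iff, Ne]
    intro h
    exact hcp (Int.natCast_inj.mp h)
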